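-- pv_equiv track=rewrite | github.com/danielissing/euler | benchmarking/100_percent/solution_chat.py | build_A_from_b
-- ===== SOURCE A (Python) =====
-- def build_A_from_b(b, N):
--     A = [0] * (N + 1)
--     for k in range(1, N + 1):
--         u = k
--         while True:
--             if u >= 2:
--                 A[k] += b[u]
--             else:
--                 break
--             if u & 1:  # stop when u is odd
--                 break
--             u >>= 1
--     return A
-- ===== SOURCE B (Python) =====
-- def build_A_from_b(b, N):
--     # DP: the halving chain from k is b[k] plus the chain from k//2 (when k is even),
--     # which is already computed -- O(N) instead of re-walking each chain.
--     A = [0] * (N + 1)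
--     for k in range(2, N + 1):
--         A[k] = b[k] + (A[k // 2] if k % 2 == 0 else 0)
--     return A
-- ===== Notes on version B (the rewrite author's own statement) =====
-- stated objective: faster
-- what changed: Instead of re-walking the whole halving chain from every k (nested while loop), B computes each entry once by dynamic programming: A[k] = b[k] + A[k//2] when k is even, else b[k].
import Mathlib
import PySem

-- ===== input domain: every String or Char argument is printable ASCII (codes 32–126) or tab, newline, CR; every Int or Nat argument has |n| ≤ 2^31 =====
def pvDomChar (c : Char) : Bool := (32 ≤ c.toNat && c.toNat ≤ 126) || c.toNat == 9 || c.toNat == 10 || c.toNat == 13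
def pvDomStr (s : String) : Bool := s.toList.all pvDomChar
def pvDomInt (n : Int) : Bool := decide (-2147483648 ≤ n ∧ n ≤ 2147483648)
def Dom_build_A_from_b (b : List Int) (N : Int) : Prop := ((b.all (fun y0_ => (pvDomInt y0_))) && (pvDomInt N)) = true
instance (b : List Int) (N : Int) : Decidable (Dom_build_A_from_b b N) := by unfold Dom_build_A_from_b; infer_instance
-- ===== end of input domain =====

-- B replaces A's per-k halving walk (O(N log N)) with an O(N) dynamic program A[k] = b[k] + A[k//2].


-- ===== PORT A =====
-- the inner 'while True' loop: acc is the running value of A[k], u the halving cursor;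
-- b[u] is ported as pyGetD (out-of-range access is excluded by Pre_ below)
def pvWhileA (b : List Int) (acc : Int) (u : Int) : Int :=
  if 2 ≤ u then
    let acc' := acc + PySem.List.pyGetD b u 0
    if PySem.Int.band u 1 = 1 then acc'
    else pvWhileA b acc' (u >>> (1:Nat))
  else acc
termination_by u.toNat
decreasing_by
  have h2 := Int.shiftRight_eq_div_pow u 1
  simp at h2
  omega

def build_A_from_b (b : List Int) (N : Int) : List Int :=
  (PySem.List.pyRange 1 (N + 1) 1).foldl
    (fun A k => PySem.List.pySetD A k (pvWhileA b (PySem.List.pyGetD A k 0) k))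
    (List.replicate (N + 1).toNat (0 : Int))

-- ===== PORT B =====
def build_A_from_b_alt (b : List Int) (N : Int) : List Int :=
  (PySem.List.pyRange 2 (N + 1) 1).foldl
    (fun A k => PySem.List.pySetD A k
      (PySem.List.pyGetD b k 0 +
        (if PySem.Int.mod k 2 = 0 then PySem.List.pyGetD A (PySem.Int.floordiv k 2) 0 else 0)))
    (List.replicate (N + 1).toNat (0 : Int))

-- ===== PRECONDITION & SPEC =====
-- Pre_: exactly where the Python A returns (for N ≥ 2 it reads b[u] for every u in 2..N,
-- so it raises IndexError unless len(b) > N)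
def Pre_build_A_from_b (b : List Int) (N : Int) : Prop := N < 2 ∨ N < (b.length : Int)
instance (b : List Int) (N : Int) : Decidable (Pre_build_A_from_b b N) := by unfold Pre_build_A_from_b; infer_instance
def pvWitness_build_A_from_b : List Int × Int := ([5, -3, 7, 2], 3)

def Spec_build_A_from_b (b : List Int) (N : Int) (out : List Int) : Prop := out = build_A_from_b_alt b N
instance (b : List Int) (N : Int) (out : List Int) : Decidable (Spec_build_A_from_b b N out) := by unfold Spec_build_A_from_b; infer_instance

-- ===== CLAIM (what is proved, stated in full; the proofs are below) =====
def Claim_equal_build_A_from_b : Prop := ∀ (b : List Int) (N : Int), Dom_build_A_from_b b N → Pre_build_A_from_b b N → Spec_build_A_from_b b N (build_A_from_b b N)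

-- ===== LEMMAS AND PROOFS =====

-- the while-loop's accumulator is additive
theorem pvWhileA_acc (b : List Int) :
    ∀ (n : Nat) (u acc : Int), u.toNat ≤ n → pvWhileA b acc u = acc + pvWhileA b 0 u := by
  intro n
  induction n with
  | zero =>
    intro u acc h
    rw [pvWhileA, pvWhileA]
    have h2 : ¬ 2 ≤ u := by omega
    simp [h2]
  | succ n ih =>
    intro u acc h
    rw [pvWhileA, pvWhileA]
    by_cases h1 : 2 ≤ u
    · have hs : (u >>> (1:Nat)) = u / 2 := by
        have := Int.shiftRight_eq_div_pow u 1; simpa using this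
      simp only [if_pos h1]
      by_cases h2 : PySem.Int.band u 1 = 1
      · simp only [if_pos h2]
        ring
      · simp only [if_neg h2]
        have ih2 := fun acc => ih (u / 2) acc (by omega)
        rw [hs]
        conv_rhs => rw [ih2 (0 + PySem.List.pyGetD b u 0)]
        conv_lhs => rw [ih2 (acc + PySem.List.pyGetD b u 0)]
        ring
    · simp [h1]

theorem pvWhileA_lt_two (b : List Int) (u : Int) (h : u < 2) : pvWhileA b 0 u = 0 := by
  rw [pvWhileA]
  have h2 : ¬ 2 ≤ u := by omega
  simp [h2]

-- the shared target: entry i holds the chain sum pvWhileA b 0 i for i < m, else 0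
def pvTgt (b : List Int) (n m : Nat) : List Int :=
  (List.range n).map (fun i => if i < m then pvWhileA b 0 (i : Int) else 0)

theorem pvTgt_small (b : List Int) (n m : Nat) (hm : m ≤ 2) :
    pvTgt b n m = List.replicate n 0 := by
  unfold pvTgt
  rw [show (fun i => if i < m then pvWhileA b 0 (i : Int) else 0) = (fun _ : Nat => (0:Int)) from ?_]
  · simp
  · funext i
    split_ifs with hi
    · exact pvWhileA_lt_two b i (by omega)
    · rfl

theorem pvTgt_getD (b : List Int) (n m i : Nat) (hi : i < n) :
    (pvTgt b n m).getD i 0 = if i < m then pvWhileA b 0 (i : Int) else 0 := by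
  unfold pvTgt
  rw [List.getD_eq_getElem?_getD]
  simp [hi]

theorem pvTgt_set (b : List Int) (n m : Nat) :
    (pvTgt b n m).set m (pvWhileA b 0 (m : Int)) = pvTgt b n (m + 1) := by
  apply List.ext_getElem
  · simp [pvTgt]
  · intro i h1 h2
    have hin : i < n := by simpa [pvTgt] using h2
    by_cases hi : i = m
    · subst hi
      rw [List.getElem_set_self (by simpa [pvTgt] using h1)]
      simp [pvTgt]
    · rw [List.getElem_set_ne (by omega)]
      simp only [pvTgt, List.getElem_map, List.getElem_range]
      have : i < m ↔ i < m + 1 := by omega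
      simp [this]

theorem foldA (b : List Int) (n : Nat) :
    ∀ m : Nat, m ≤ n →
      (PySem.List.pyRange 1 (m : Int) 1).foldl
        (fun A k => PySem.List.pySetD A k (pvWhileA b (PySem.List.pyGetD A k 0) k))
        (List.replicate n (0 : Int)) = pvTgt b n m := by
  intro m
  induction m with
  | zero =>
    intro _
    rw [PySem.List.pyRange_one_eq_nil (by omega), pvTgt_small b n 0 (by omega)]
    rfl
  | succ m ih =>
    intro hm
    by_cases hm0 : m = 0
    · subst hm0
      rw [PySem.List.pyRange_one_eq_nil (by omega), pvTgt_small b n 1 (by omega)]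
      rfl
    · rw [show ((m + 1 : Nat) : Int) = (m : Int) + 1 by push_cast; ring,
          PySem.List.pyRange_one_succ_right (by omega), List.foldl_append, ih (by omega)]
      simp only [List.foldl_cons, List.foldl_nil]
      rw [PySem.List.pySetD_natCast, PySem.List.pyGetD_natCast, pvTgt_getD b n m m (by omega)]
      simp only [lt_irrefl, if_false]
      rw [pvWhileA_acc b (m : Int).toNat (m : Int) 0 (by omega), zero_add]
      exact pvTgt_set b n m

theorem foldB (b : List Int) (n : Nat) :
    ∀ m : Nat, m ≤ n →
      (PySem.List.pyRange 2 (m : Int) 1).foldl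
        (fun A k => PySem.List.pySetD A k
          (PySem.List.pyGetD b k 0 +
            (if PySem.Int.mod k 2 = 0 then PySem.List.pyGetD A (PySem.Int.floordiv k 2) 0 else 0)))
        (List.replicate n (0 : Int)) = pvTgt b n m := by
  intro m
  induction m with
  | zero =>
    intro _
    rw [PySem.List.pyRange_one_eq_nil (by omega), pvTgt_small b n 0 (by omega)]
    rfl
  | succ m ih =>
    intro hm
    by_cases hm1 : m ≤ 1
    · rw [PySem.List.pyRange_one_eq_nil (by omega), pvTgt_small b n (m + 1) (by omega)]
      rfl
    · rw [show ((m + 1 : Nat) : Int) = (m : Int) + 1 by push_cast; ring,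
          PySem.List.pyRange_one_succ_right (by omega), List.foldl_append, ih (by omega)]
      simp only [List.foldl_cons, List.foldl_nil]
      rw [PySem.List.pySetD_natCast]
      have hdiv : PySem.Int.floordiv (m : Int) 2 = ((m / 2 : Nat) : Int) :=
        PySem.Int.floordiv_natCast m 2
      have hmod : PySem.Int.mod (m : Int) 2 = ((m % 2 : Nat) : Int) :=
        PySem.Int.mod_natCast m 2
      rw [hdiv, hmod]
      simp only [PySem.List.pyGetD_natCast]
      rw [pvTgt_getD b n m (m / 2) (by omega)]
      have hlt : m / 2 < m := by omega
      rw [if_pos hlt]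
      -- the new cell value equals the chain sum pvWhileA b 0 m
      have hchain : b.getD m 0 +
          (if ((m % 2 : Nat) : Int) = 0 then pvWhileA b 0 ((m / 2 : Nat) : Int) else 0) =
          pvWhileA b 0 (m : Int) := by
        conv_rhs => rw [pvWhileA]
        have h2 : (2 : Int) ≤ (m : Int) := by omega
        have hband : PySem.Int.band (m : Int) 1 = PySem.Int.mod (m : Int) 2 := by
          simpa using PySem.Int.band_one (m : Int)
        have hs : ((m : Int) >>> (1:Nat)) = (m : Int) / 2 := by
          have := Int.shiftRight_eq_div_pow (m : Int) 1; simpa using this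
        rw [if_pos h2]
        by_cases hpar : m % 2 = 0
        · have hb1 : PySem.Int.band (m : Int) 1 ≠ 1 := by rw [hband, hmod]; omega
          simp only [if_neg hb1]
          rw [if_pos (show ((m % 2 : Nat) : Int) = 0 by exact_mod_cast congrArg (Nat.cast : Nat → Int) hpar)]
          simp only [PySem.List.pyGetD_natCast, zero_add]
          rw [hs, show (m : Int) / 2 = ((m / 2 : Nat) : Int) by omega]
          exact (pvWhileA_acc b (m / 2) ((m / 2 : Nat) : Int) (b.getD m 0) (by simp)).symm
        · have hp1 : m % 2 = 1 := by omega
          have hb1 : PySem.Int.band (m : Int) 1 = 1 := by rw [hband, hmod, hp1]; rfl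
          simp only [if_pos hb1]
          rw [if_neg (show ¬ ((m % 2 : Nat) : Int) = 0 by rw [hp1]; norm_num)]
          simp only [PySem.List.pyGetD_natCast, zero_add, add_zero]
      rw [hchain]
      exact pvTgt_set b n m

-- ===== VERDICT (by name: the statement is the Claim_ definition above) =====
theorem build_A_from_b_spec : Claim_equal_build_A_from_b := by
  intro b N _ _
  unfold Spec_build_A_from_b build_A_from_b build_A_from_b_alt
  by_cases h : N + 1 < 1
  · rw [PySem.List.pyRange_one_eq_nil (by omega), PySem.List.pyRange_one_eq_nil (by omega)]
    rfl
  · have hn : ((N + 1).toNat : Int) = N + 1 := by omega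
    have hA := foldA b (N+1).toNat (N+1).toNat le_rfl
    have hB := foldB b (N+1).toNat (N+1).toNat le_rfl
    rw [hn] at hA hB
    rw [hA, hB]
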